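-- pv_equiv track=rewrite | github.com/senanradjabov/atu-leaf | captcha.py | _check_data_from_circle
-- ===== SOURCE A (Python) =====
-- def _check_data_from_circle(answers: list, answers_dict: dict, pixel_number: int) -> list:
--     """Получение ответа из данных"""
--     result = dict()
--
--     for i, elm in enumerate(answers, 1):
--         s = list(filter(lambda x: x > pixel_number, elm))  # Выбор пикселей больше 690
--         result[i] = answers_dict.get(elm.index(max(elm)) + 1)
--
--         if len(s) >= 2:  # Проверка ответа на больше чем одного выбранного ответа
--             result[i] = "Səfh"
--
--         if not len(s):  # Проверка ответа на пустоту
--             result[i] = "Boş"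
--
--     return list(result.values())
-- ===== SOURCE B (Python) =====
-- def _check_data_from_circle(answers: list, answers_dict: dict, pixel_number: int) -> list:
--     """Single pass per answer list: track (running max, its first index) and a
--     count of pixels above the threshold, then pick the label once."""
--     result = []
--     for elm in answers:
--         best, best_i = elm[0], 0
--         cnt = 0
--         for j, x in enumerate(elm):
--             if x > best:
--                 best, best_i = x, j
--             if x > pixel_number:
--                 cnt += 1
--         if cnt == 0:
--             label = "Boş"
--         elif cnt >= 2:
--             label = "Səfh"
--         else:
--             label = answers_dict.get(best_i + 1)
--         result.append(label)
--     return result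
-- ===== Notes on version B (the rewrite author's own statement) =====
-- stated objective: simpler
-- what changed: Replaces A's three scans per answer list (filter for above-threshold pixels, max(), elm.index()) and the dict keyed by enumerate index with a single explicit loop per list that tracks the running max, its first index and an above-threshold count, choosing the label once and appending it to a plain result list.
import Mathlib
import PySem

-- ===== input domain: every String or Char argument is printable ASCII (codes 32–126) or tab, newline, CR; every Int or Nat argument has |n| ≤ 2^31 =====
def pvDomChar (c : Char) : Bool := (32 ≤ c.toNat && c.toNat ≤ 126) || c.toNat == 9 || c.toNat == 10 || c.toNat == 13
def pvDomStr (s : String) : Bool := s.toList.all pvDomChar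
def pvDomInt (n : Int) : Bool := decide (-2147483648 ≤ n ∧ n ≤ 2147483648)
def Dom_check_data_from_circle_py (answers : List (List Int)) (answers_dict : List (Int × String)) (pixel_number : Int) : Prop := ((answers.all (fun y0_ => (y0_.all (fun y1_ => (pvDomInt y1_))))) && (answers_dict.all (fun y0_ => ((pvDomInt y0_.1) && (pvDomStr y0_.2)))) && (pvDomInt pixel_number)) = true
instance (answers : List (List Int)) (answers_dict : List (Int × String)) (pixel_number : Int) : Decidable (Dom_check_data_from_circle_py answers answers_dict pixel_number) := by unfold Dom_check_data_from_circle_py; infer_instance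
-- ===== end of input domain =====

-- B merges A's three scans per answer list (filter, max, elm.index) into one explicit loop
-- tracking (running max, its first index, count above threshold) and appends labels to a
-- plain list instead of a dict keyed by enumerate index; objective: simpler/alternative.
-- ===== PORT A =====
-- answers_dict.get(k): first matching key in the association list
def pvDictGet (answers_dict : List (Int × String)) (k : Int) : Option String :=
  (answers_dict.find? (fun p => p.1 == k)).map (·.2)

def check_data_from_circle_py (answers : List (List Int)) (answers_dict : List (Int × String)) (pixel_number : Int) : List (Option String) :=
  ((PySem.List.enumerate answers 1).foldl
    (fun (result : PySem.Dict Int (Option String)) p =>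
      let i := p.1
      let elm := p.2
      let s := elm.filter (fun x => decide (pixel_number < x))
      match PySem.List.max? elm (fun y => y) with
      | none => result
      | some m =>
        match PySem.List.index? elm m with
        | none => result
        | some idx =>
          let result := result.insert i (pvDictGet answers_dict ((idx : Int) + 1))
          let result := if 2 ≤ s.length then result.insert i (some "Səfh") else result
          if s.length = 0 then result.insert i (some "Boş") else result)
    PySem.Dict.empty).values

-- ===== PORT B =====
def check_data_from_circle_py_alt (answers : List (List Int)) (answers_dict : List (Int × String)) (pixel_number : Int) : List (Option String) :=
  answers.foldl
    (fun (result : List (Option String)) elm =>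
      match elm with
      | [] => result
      | e0 :: _ =>
        let st := (PySem.List.enumerate elm 0).foldl
          (fun (st : (Int × Int) × Int) p =>
            let bb := if st.1.1 < p.2 then (p.2, p.1) else st.1
            let cnt := if pixel_number < p.2 then st.2 + 1 else st.2
            (bb, cnt)) ((e0, 0), 0)
        let label : Option String :=
          if st.2 = 0 then some "Boş"
          else if 2 ≤ st.2 then some "Səfh"
          else pvDictGet answers_dict (st.1.2 + 1)
        result ++ [label])
    []

-- ===== PRECONDITION & SPEC =====
-- Pre_ excludes empty answer lists, on which Python A raises ValueError (max() of an empty sequence)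
def Pre_check_data_from_circle_py (answers : List (List Int)) (answers_dict : List (Int × String)) (pixel_number : Int) : Prop :=
  ∀ elm ∈ answers, elm ≠ []
instance (answers : List (List Int)) (answers_dict : List (Int × String)) (pixel_number : Int) : Decidable (Pre_check_data_from_circle_py answers answers_dict pixel_number) := by unfold Pre_check_data_from_circle_py; infer_instance

def pvWitness_check_data_from_circle_py : List (List Int) × (List (Int × String)) × Int :=
  ([[1, 5, 2], [800, 700]], [(1, "a"), (2, "b"), (3, "c")], 690)

def Spec_check_data_from_circle_py (answers : List (List Int)) (answers_dict : List (Int × String)) (pixel_number : Int) (out : List (Option String)) : Prop := out = check_data_from_circle_py_alt answers answers_dict pixel_number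
instance (answers : List (List Int)) (answers_dict : List (Int × String)) (pixel_number : Int) (out : List (Option String)) : Decidable (Spec_check_data_from_circle_py answers answers_dict pixel_number out) := by unfold Spec_check_data_from_circle_py; infer_instance

-- ===== CLAIM (what is proved, stated in full; the proofs are below) =====
def Claim_equal_check_data_from_circle_py : Prop := ∀ (answers : List (List Int)) (answers_dict : List (Int × String)) (pixel_number : Int), Dom_check_data_from_circle_py answers answers_dict pixel_number → Pre_check_data_from_circle_py answers answers_dict pixel_number → Spec_check_data_from_circle_py answers answers_dict pixel_number (check_data_from_circle_py answers answers_dict pixel_number)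

-- ===== LEMMAS AND PROOFS =====

-- the label both programs compute for one non-empty answer list
def pvLabel (answers_dict : List (Int × String)) (pixel_number : Int) (elm : List Int) : Option String :=
  if (elm.filter (fun x => decide (pixel_number < x))).length = 0 then some "Boş"
  else if 2 ≤ (elm.filter (fun x => decide (pixel_number < x))).length then some "Səfh"
  else match PySem.List.max? elm (fun y => y) with
       | none => none
       | some m =>
         match PySem.List.index? elm m with
         | none => none
         | some idx => pvDictGet answers_dict ((idx : Int) + 1)

lemma pvMaxLoop (e0 : Int) (t : List Int) :
    ∃ k : Nat,
      (PySem.List.enumerate t 1).foldl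
        (fun (st : Int × Int) p => if st.1 < p.2 then (p.2, p.1) else st) (e0, 0)
        = (t.foldl max e0, (k : Int)) ∧
      PySem.List.index? (e0 :: t) (t.foldl max e0) = some k := by
  induction t using List.reverseRecOn with
  | nil =>
    exact ⟨0, by simp [PySem.List.enumerate], by rw [show List.foldl max e0 [] = e0 from rfl]; exact PySem.List.index?_cons_self e0 []⟩
  | append_singleton t x ih =>
    obtain ⟨k, hfold, hidx⟩ := ih
    have hm : PySem.List.max? (e0 :: t) (fun y => y) = some (t.foldl max e0) :=
      PySem.List.max?_id_cons e0 t
    rw [PySem.List.enumerate_append, List.foldl_append, hfold]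
    simp only [PySem.List.enumerate, List.foldl_cons, List.foldl_nil, List.foldl_append]
    by_cases hlt : t.foldl max e0 < x
    · refine ⟨t.length + 1, ?_, ?_⟩
      · simp [hlt, max_eq_right (le_of_lt hlt)]
        omega
      · have hnot : x ∉ e0 :: t := by
          intro hx
          exact absurd (PySem.List.max?_isMax hm x hx) (by simpa using hlt)
        have := PySem.List.index?_append_singleton_self (e0 :: t) x hnot
        simp only [max_eq_right (le_of_lt hlt)]
        rw [show e0 :: (t ++ [x]) = (e0 :: t) ++ [x] by simp]
        rw [this]
        simp
    · refine ⟨k, ?_, ?_⟩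
      · simp [hlt, max_eq_left (le_of_not_gt hlt)]
      · have hmem : t.foldl max e0 ∈ e0 :: t := PySem.List.max?_mem hm
        simp only [max_eq_left (le_of_not_gt hlt)]
        rw [show e0 :: (t ++ [x]) = (e0 :: t) ++ [x] by simp]
        rw [PySem.List.index?_append_of_mem _ hmem]
        exact hidx

lemma bodyA_eq (answers_dict : List (Int × String)) (pixel_number : Int)
    (result : PySem.Dict Int (Option String)) (i : Int) (elm : List Int) (h : elm ≠ []) :
    (let s := elm.filter (fun x => decide (pixel_number < x))
     match PySem.List.max? elm (fun y => y) with
     | none => result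
     | some m =>
       (match PySem.List.index? elm m with
        | none => result
        | some idx =>
          let result := result.insert i (pvDictGet answers_dict ((idx : Int) + 1))
          let result := if 2 ≤ s.length then result.insert i (some "Səfh") else result
          if s.length = 0 then result.insert i (some "Boş") else result))
    = result.insert i (pvLabel answers_dict pixel_number elm) := by
  obtain ⟨e0, t, rfl⟩ := List.exists_cons_of_ne_nil h
  have hm : PySem.List.max? (e0 :: t) (fun y => y) = some (t.foldl max e0) :=
    PySem.List.max?_id_cons e0 t
  obtain ⟨k, hfold, hidx⟩ := pvMaxLoop e0 t
  simp only [pvLabel, hm, hidx]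
  by_cases h0 : ((e0 :: t).filter (fun x => decide (pixel_number < x))).length = 0
  · have h2 : ¬ 2 ≤ ((e0 :: t).filter (fun x => decide (pixel_number < x))).length := by omega
    simp [h0, h2, PySem.Dict.insert_insert_self]
  · by_cases h2 : 2 ≤ ((e0 :: t).filter (fun x => decide (pixel_number < x))).length
    · simp [h0, h2, PySem.Dict.insert_insert_self]
    · simp [h0, h2]

lemma countLoop (pix : Int) (l : List Int) (s c : Int) :
    (PySem.List.enumerate l s).foldl (fun c p => if pix < p.2 then c + 1 else c) c
      = c + ((l.filter (fun x => decide (pix < x))).length : Int) := by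
  rw [← List.foldl_map (f := fun p : Int × Int => p.2)
        (g := fun c x => if pix < x then c + 1 else c),
      PySem.List.map_snd_enumerate]
  rw [show (fun (c : Int) (x : Int) => if pix < x then c + 1 else c)
        = (fun (c : Int) (x : Int) => if (decide (pix < x)) = true then c + 1 else c) by
        funext c x; simp]
  rw [PySem.List.foldl_count_if]
  simp [List.countP_eq_length_filter]

lemma bodyB_eq (answers_dict : List (Int × String)) (pixel_number : Int)
    (result : List (Option String)) (elm : List Int) :
    elm ≠ [] →
    (match elm with
     | [] => result
     | e0 :: _ =>
       let st := (PySem.List.enumerate elm 0).foldl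
         (fun (st : (Int × Int) × Int) p =>
           let bb := if st.1.1 < p.2 then (p.2, p.1) else st.1
           let cnt := if pixel_number < p.2 then st.2 + 1 else st.2
           (bb, cnt)) ((e0, 0), 0)
       let label : Option String :=
         if st.2 = 0 then some "Boş"
         else if 2 ≤ st.2 then some "Səfh"
         else pvDictGet answers_dict (st.1.2 + 1)
       result ++ [label])
    = result ++ [pvLabel answers_dict pixel_number elm] := by
  intro h
  obtain ⟨e0, t, rfl⟩ := List.exists_cons_of_ne_nil h
  simp only
  rw [show (fun (st : (Int × Int) × Int) (p : Int × Int) =>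
        let bb := if st.1.1 < p.2 then (p.2, p.1) else st.1
        let cnt := if pixel_number < p.2 then st.2 + 1 else st.2
        (bb, cnt))
      = (fun (st : (Int × Int) × Int) (p : Int × Int) =>
        ((fun (bb : Int × Int) (p : Int × Int) => if bb.1 < p.2 then (p.2, p.1) else bb) st.1 p,
         (fun (c : Int) (p : Int × Int) => if pixel_number < p.2 then c + 1 else c) st.2 p)) from rfl]
  rw [PySem.List.foldl_prod_mk
        (fun (bb : Int × Int) (p : Int × Int) => if bb.1 < p.2 then (p.2, p.1) else bb)
        (fun (c : Int) (p : Int × Int) => if pixel_number < p.2 then c + 1 else c)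
        (PySem.List.enumerate (e0 :: t) 0) (e0, 0) 0]
  obtain ⟨k, hfold, hidx⟩ := pvMaxLoop e0 t
  have hmaxpart : (PySem.List.enumerate (e0 :: t) 0).foldl
      (fun (bb : Int × Int) (p : Int × Int) => if bb.1 < p.2 then (p.2, p.1) else bb) (e0, 0)
      = (t.foldl max e0, (k : Int)) := by
    rw [PySem.List.enumerate_cons, List.foldl_cons]
    simpa using hfold
  rw [hmaxpart, countLoop]
  have hm : PySem.List.max? (e0 :: t) (fun y => y) = some (t.foldl max e0) :=
    PySem.List.max?_id_cons e0 t
  simp only [pvLabel, hm, hidx, zero_add]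
  by_cases h0 : (((e0 :: t).filter (fun x => decide (pixel_number < x))).length : Int) = 0
  · have h0' : ((e0 :: t).filter (fun x => decide (pixel_number < x))).length = 0 := by
      exact_mod_cast h0
    simp [h0']
  · have h0' : ¬ ((e0 :: t).filter (fun x => decide (pixel_number < x))).length = 0 := by
      intro hc; exact h0 (by exact_mod_cast hc)
    by_cases h2 : 2 ≤ (((e0 :: t).filter (fun x => decide (pixel_number < x))).length : Int)
    · have h2' : 2 ≤ ((e0 :: t).filter (fun x => decide (pixel_number < x))).length := by
        exact_mod_cast h2
      simp [h0', h2, h2']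
    · have h2' : ¬ 2 ≤ ((e0 :: t).filter (fun x => decide (pixel_number < x))).length := by
        intro hc; exact h2 (by exact_mod_cast hc)
      simp [h0', h2, h2']

lemma pv_main (answers : List (List Int)) (answers_dict : List (Int × String)) (pixel_number : Int)
    (hpre : ∀ elm ∈ answers, elm ≠ []) :
    check_data_from_circle_py answers answers_dict pixel_number
      = check_data_from_circle_py_alt answers answers_dict pixel_number := by
  have hmem : ∀ p ∈ PySem.List.enumerate answers 1, p.2 ∈ answers := by
    intro p hp
    obtain ⟨k, hk, rfl⟩ := (PySem.List.mem_enumerate_iff answers 1 p).mp hp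
    exact List.getElem_mem hk
  -- A side
  have hA : check_data_from_circle_py answers answers_dict pixel_number
      = answers.map (pvLabel answers_dict pixel_number) := by
    unfold check_data_from_circle_py
    rw [PySem.List.foldl_congr_mem _ _
        (fun (result : PySem.Dict Int (Option String)) p =>
          result.insert p.1 (pvLabel answers_dict pixel_number p.2)) _
        (fun acc p hp => bodyA_eq answers_dict pixel_number acc p.1 p.2 (hpre p.2 (hmem p hp)))]
    rw [show (fun (result : PySem.Dict Int (Option String)) (p : Int × List Int) =>
          result.insert p.1 (pvLabel answers_dict pixel_number p.2))
        = (fun (result : PySem.Dict Int (Option String)) (p : Int × List Int) =>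
          result.insert ((fun q : Int × List Int => q.1) p)
            ((fun q : Int × List Int => pvLabel answers_dict pixel_number q.2) p)) from rfl]
    have hnodup : ((PySem.List.enumerate answers 1).map (fun q : Int × List Int => q.1)).Nodup := by
      refine (List.pairwise_map).mpr ?_
      exact (PySem.List.pairwise_lt_enumerate answers 1).imp (fun h => ne_of_lt h)
    rw [show ((PySem.List.enumerate answers 1).foldl
          (fun (result : PySem.Dict Int (Option String)) (p : Int × List Int) =>
            result.insert ((fun q : Int × List Int => q.1) p)
              ((fun q : Int × List Int => pvLabel answers_dict pixel_number q.2) p))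
          PySem.Dict.empty).values
        = (((PySem.List.enumerate answers 1).foldl
          (fun (result : PySem.Dict Int (Option String)) (p : Int × List Int) =>
            result.insert ((fun q : Int × List Int => q.1) p)
              ((fun q : Int × List Int => pvLabel answers_dict pixel_number q.2) p))
          PySem.Dict.empty).items).map (·.2) from rfl]
    rw [PySem.Dict.items_foldl_insert_fresh _ _ _ _
        (fun a _ => PySem.Dict.contains_empty _) hnodup]
    rw [show (PySem.Dict.empty : PySem.Dict Int (Option String)).items = [] from rfl,
       List.nil_append, List.map_map]
    rw [show ((fun p : Int × Option String => p.2) ∘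
          (fun p : Int × List Int => ((fun q : Int × List Int => q.1) p,
            (fun q : Int × List Int => pvLabel answers_dict pixel_number q.2) p)))
        = (fun p : Int × List Int => pvLabel answers_dict pixel_number p.2) from rfl]
    rw [show (fun p : Int × List Int => pvLabel answers_dict pixel_number p.2)
        = (pvLabel answers_dict pixel_number) ∘ (fun p : Int × List Int => p.2) from rfl]
    rw [← List.map_map, PySem.List.map_snd_enumerate]
  -- B side
  have hB : check_data_from_circle_py_alt answers answers_dict pixel_number
      = answers.map (pvLabel answers_dict pixel_number) := by
    unfold check_data_from_circle_py_alt
    rw [PySem.List.foldl_congr_mem _ _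
        (fun (result : List (Option String)) elm =>
          result ++ [pvLabel answers_dict pixel_number elm]) _
        (fun acc elm helm => bodyB_eq answers_dict pixel_number acc elm (hpre elm helm))]
    rw [PySem.List.foldl_append_singleton_eq_map]
    simp
  rw [hA, hB]

-- ===== VERDICT (by name: the statement is the Claim_ definition above) =====
theorem check_data_from_circle_py_spec : Claim_equal_check_data_from_circle_py := by
  intro answers answers_dict pixel_number _ hpre
  unfold Spec_check_data_from_circle_py
  exact pv_main answers answers_dict pixel_number hpre
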